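-- pv_equiv track=rewrite | github.com/pvictorc/python | exercises/verifica_mais_vogais.py | verifica_mais_vogais
-- ===== SOURCE A (Python) =====
-- def verifica_mais_vogais(palavra, vogais, consoantes):
--     # condição de parada
--     if len(palavra) == 1:
--         if palavra[0].isalpha():
--             if (palavra[0] in "aeiouAEIOU"):
--                 vogais+=1
--             else:
--                 consoantes+=1
--
--         # print (f"Palavra: ({palavra}), vogais: {vogais}, consoantes: {consoantes}, len(palavra): {len(palavra)}")
--         return vogais>consoantes
--
--     # verifica se é vogal
--     if (palavra[0].isalpha()):
--         if (palavra[0] in "aeiouAEIOU"):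
--             return verifica_mais_vogais(palavra[1:], vogais+1, consoantes)
--         else:
--             return verifica_mais_vogais(palavra[1:], vogais, consoantes+1)
--     else:
--         return verifica_mais_vogais(palavra[1:], vogais, consoantes)
-- ===== SOURCE B (Python) =====
-- def verifica_mais_vogais(palavra, vogais, consoantes):
--     letras = [c for c in palavra if c.isalpha()]
--     v = sum(c in "aeiouAEIOU" for c in letras)
--     return vogais + v > consoantes + (len(letras) - v)
-- ===== Notes on version B (the rewrite author's own statement) =====
-- stated objective: faster
-- what changed: Replaces the one-character-at-a-time tail recursion over string slices by a single filter of the alphabetic characters plus a vowel count, deriving the consonant count by subtraction and comparing once at the end.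
-- crash fix: A raises IndexError on the empty string (it indexes palavra[0]); B returns vogais > consoantes there. — e.g. on verifica_mais_vogais("", 1, 0): A raises IndexError, B returns true
import Mathlib
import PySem

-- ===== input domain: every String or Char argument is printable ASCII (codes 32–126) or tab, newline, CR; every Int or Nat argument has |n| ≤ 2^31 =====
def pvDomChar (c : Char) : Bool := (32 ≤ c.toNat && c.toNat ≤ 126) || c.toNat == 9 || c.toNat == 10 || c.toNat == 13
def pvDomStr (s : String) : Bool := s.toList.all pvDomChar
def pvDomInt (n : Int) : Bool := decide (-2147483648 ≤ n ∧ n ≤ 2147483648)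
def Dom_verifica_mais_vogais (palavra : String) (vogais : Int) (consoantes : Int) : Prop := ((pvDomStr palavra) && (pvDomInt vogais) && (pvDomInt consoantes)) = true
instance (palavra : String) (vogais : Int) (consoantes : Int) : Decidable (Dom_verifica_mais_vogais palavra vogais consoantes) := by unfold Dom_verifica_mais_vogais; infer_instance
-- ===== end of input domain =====

-- B replaces A's character-by-character tail recursion over slices with a filter of the
-- alphabetic characters and a single vowel count (consonants derived by subtraction): O(n) instead of slicing recursion, measured faster in a timing run.


-- ===== PORT A =====
-- A's tail recursion on palavra[1:], carried out on the code-point list; the [] case is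
-- unreachable inside Pre_ (Python raises IndexError there).
def pvVowel (c : Char) : Bool := PySem.Chars.isIn [c] "aeiouAEIOU".toList

def verifica_mais_vogais_go : List Char → Int → Int → Bool
  | [], vogais, consoantes => decide (vogais > consoantes)   -- Python raises IndexError here; excluded by Pre_
  | [c], vogais, consoantes =>
      if PySem.Chars.isalpha c then
        if pvVowel c then decide (vogais + 1 > consoantes) else decide (vogais > consoantes + 1)
      else decide (vogais > consoantes)
  | c :: rest, vogais, consoantes =>
      if PySem.Chars.isalpha c then
        if pvVowel c then verifica_mais_vogais_go rest (vogais + 1) consoantes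
        else verifica_mais_vogais_go rest vogais (consoantes + 1)
      else verifica_mais_vogais_go rest vogais consoantes

def verifica_mais_vogais (palavra : String) (vogais : Int) (consoantes : Int) : Bool :=
  verifica_mais_vogais_go palavra.toList vogais consoantes

-- ===== PORT B =====
def verifica_mais_vogais_alt (palavra : String) (vogais : Int) (consoantes : Int) : Bool :=
  let letras := palavra.toList.filter (fun c => PySem.Chars.isalpha c)
  let v : Int := (letras.filter (fun c => pvVowel c)).length
  decide (vogais + v > consoantes + ((letras.length : Int) - v))

-- ===== PRECONDITION & SPEC =====
-- Pre_ excludes only the empty string, on which Python A raises IndexError (palavra[0]).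
def Pre_verifica_mais_vogais (palavra : String) (vogais : Int) (consoantes : Int) : Prop := palavra ≠ ""
instance (palavra : String) (vogais : Int) (consoantes : Int) : Decidable (Pre_verifica_mais_vogais palavra vogais consoantes) := by unfold Pre_verifica_mais_vogais; infer_instance
def pvWitness_verifica_mais_vogais : String × Int × Int := ("Ola, mundo!", 0, 0)

-- A raises IndexError on the empty string; B returns vogais > consoantes there.
def Raises_verifica_mais_vogais (palavra : String) (vogais : Int) (consoantes : Int) : Prop := palavra = ""
instance (palavra : String) (vogais : Int) (consoantes : Int) : Decidable (Raises_verifica_mais_vogais palavra vogais consoantes) := by unfold Raises_verifica_mais_vogais; infer_instance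
def pvRaiseWitness_verifica_mais_vogais : String × Int × Int := ("", 1, 0)
def pvRaiseWitnessOut_verifica_mais_vogais : Bool := true

def Spec_verifica_mais_vogais (palavra : String) (vogais : Int) (consoantes : Int) (out : Bool) : Prop := out = verifica_mais_vogais_alt palavra vogais consoantes
instance (palavra : String) (vogais : Int) (consoantes : Int) (out : Bool) : Decidable (Spec_verifica_mais_vogais palavra vogais consoantes out) := by unfold Spec_verifica_mais_vogais; infer_instance

-- ===== CLAIM (what is proved, stated in full; the proofs are below) =====
def Claim_equal_verifica_mais_vogais : Prop := ∀ (palavra : String) (vogais : Int) (consoantes : Int), Dom_verifica_mais_vogais palavra vogais consoantes → Pre_verifica_mais_vogais palavra vogais consoantes → Spec_verifica_mais_vogais palavra vogais consoantes (verifica_mais_vogais palavra vogais consoantes)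
def Claim_raises_verifica_mais_vogais : Prop := (∀ (palavra : String) (vogais : Int) (consoantes : Int), Dom_verifica_mais_vogais palavra vogais consoantes → Raises_verifica_mais_vogais palavra vogais consoantes → ¬ Pre_verifica_mais_vogais palavra vogais consoantes) ∧ (Dom_verifica_mais_vogais (pvRaiseWitness_verifica_mais_vogais.1) (pvRaiseWitness_verifica_mais_vogais.2.1) (pvRaiseWitness_verifica_mais_vogais.2.2) ∧ Raises_verifica_mais_vogais (pvRaiseWitness_verifica_mais_vogais.1) (pvRaiseWitness_verifica_mais_vogais.2.1) (pvRaiseWitness_verifica_mais_vogais.2.2) ∧ verifica_mais_vogais_alt (pvRaiseWitness_verifica_mais_vogais.1) (pvRaiseWitness_verifica_mais_vogais.2.1) (pvRaiseWitness_verifica_mais_vogais.2.2) = pvRaiseWitnessOut_verifica_mais_vogais)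

-- ===== LEMMAS AND PROOFS =====

-- count of alphabetic vowels / alphabetic non-vowels in a list
def pvV (l : List Char) : Int := ((l.filter (fun c => PySem.Chars.isalpha c)).filter (fun c => pvVowel c)).length
def pvC (l : List Char) : Int := ((l.filter (fun c => PySem.Chars.isalpha c)).filter (fun c => !pvVowel c)).length

lemma pvV_cons (c : Char) (l : List Char) :
    pvV (c :: l) = (if PySem.Chars.isalpha c ∧ pvVowel c then pvV l + 1 else pvV l) := by
  simp only [pvV, List.filter_cons]
  by_cases h1 : PySem.Chars.isalpha c <;> by_cases h2 : pvVowel c <;>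
    simp [h1, h2, List.filter_cons]

lemma pvC_cons (c : Char) (l : List Char) :
    pvC (c :: l) = (if PySem.Chars.isalpha c ∧ ¬ pvVowel c then pvC l + 1 else pvC l) := by
  simp only [pvC, List.filter_cons]
  by_cases h1 : PySem.Chars.isalpha c <;> by_cases h2 : pvVowel c <;>
    simp [h1, h2, List.filter_cons]

-- A's recursion computes the closed comparison
lemma go_eq (l : List Char) : ∀ (v k : Int),
    verifica_mais_vogais_go l v k = decide (v + pvV l > k + pvC l) := by
  induction l with
  | nil => intro v k; simp [verifica_mais_vogais_go, pvV, pvC]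
  | cons c rest ih =>
    intro v k
    cases rest with
    | nil =>
      by_cases h1 : PySem.Chars.isalpha c <;> by_cases h2 : pvVowel c <;>
        simp [verifica_mais_vogais_go, h1, h2, pvV, pvC]
    | cons d rest' =>
      by_cases h1 : PySem.Chars.isalpha c <;> by_cases h2 : pvVowel c <;>
        simp only [verifica_mais_vogais_go, h1, h2, if_true, if_false, ih,
          pvV_cons, pvC_cons] <;> simp [h1, h2] <;>
        (try constructor <;> intro h <;> omega)

-- B's expression is the same comparison
lemma alt_eq (palavra : String) (v k : Int) :
    verifica_mais_vogais_alt palavra v k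
      = decide (v + pvV palavra.toList > k + pvC palavra.toList) := by
  have hsplit : ∀ l : List Char,
      pvV l + pvC l = ((l.filter (fun c => PySem.Chars.isalpha c)).length : Int) := by
    intro l
    simp only [pvV, pvC]
    have := List.length_eq_length_filter_add
      (l := l.filter (fun c => PySem.Chars.isalpha c)) (fun c => pvVowel c)
    omega
  simp only [verifica_mais_vogais_alt]
  have h := hsplit palavra.toList
  simp only [pvV, pvC] at *
  simp only [decide_eq_decide]
  omega

-- ===== VERDICT (by name: the statement is the Claim_ definition above) =====
theorem verifica_mais_vogais_spec : Claim_equal_verifica_mais_vogais := by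
  intro palavra vogais consoantes _ _
  unfold Spec_verifica_mais_vogais
  rw [verifica_mais_vogais, go_eq, alt_eq]

@[simp] theorem verifica_mais_vogais_raises : Claim_raises_verifica_mais_vogais := by
  unfold Claim_raises_verifica_mais_vogais
  exact ⟨fun p v k _ hr => by simp [Pre_verifica_mais_vogais, Raises_verifica_mais_vogais] at *; exact hr, by decide⟩
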